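-- pv_equiv track=rewrite | github.com/lym0302/CosyVoice | examples/hindi/cosyvoice_0625/data_process/copy_perspk.py | extract_spk
-- ===== SOURCE A (Python) =====
-- def extract_spk(filename):
--     # 提取前缀下划线
--     pre_ext = ''
--     for ch in filename:
--         if ch == '_':
--             pre_ext += '_'
--         else:
--             break
--
--     # 去掉前缀下划线后的部分
--     rest = filename.lstrip('_')
--     spk_temp = rest.split('__')[0] if rest else ''
--
--     return pre_ext + spk_temp
-- ===== SOURCE B (Python) =====
-- def extract_spk(filename):
--     # count of leading underscores; the speaker prefix is a slice of filename
--     n = len(filename) - len(filename.lstrip('_'))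
--     idx = filename.find('__', n)
--     return filename if idx == -1 else filename[:idx]
-- ===== Notes on version B (the rewrite author's own statement) =====
-- stated objective: simpler
-- what changed: B computes the cut index directly with one offset find('__', n) after counting leading underscores, returning a single slice of the input instead of building a prefix character by character, lstrip-ing, splitting on '__' and concatenating.
import Mathlib
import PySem

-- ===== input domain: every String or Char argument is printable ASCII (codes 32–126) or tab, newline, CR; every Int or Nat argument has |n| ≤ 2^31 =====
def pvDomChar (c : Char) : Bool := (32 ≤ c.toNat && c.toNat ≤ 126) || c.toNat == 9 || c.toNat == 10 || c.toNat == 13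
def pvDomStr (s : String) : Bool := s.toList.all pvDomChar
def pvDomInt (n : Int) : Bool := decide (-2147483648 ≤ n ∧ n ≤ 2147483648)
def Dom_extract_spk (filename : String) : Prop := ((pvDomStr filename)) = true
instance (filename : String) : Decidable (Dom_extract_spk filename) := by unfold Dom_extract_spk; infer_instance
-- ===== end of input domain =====

-- B replaces A's character-by-character prefix loop + lstrip + split('__') + concatenation
-- by one offset search find('__', n) and a single slice of the input (objective: simpler).

-- ===== PORT A =====
-- the 'for ch in filename: if ch == '_': pre_ext += '_' else: break' loop
def extractSpkPre : List Char → List Char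
  | [] => []
  | c :: cs => if c == '_' then '_' :: extractSpkPre cs else []

def extract_spk (filename : String) : String :=
  let pre_ext := extractSpkPre filename.toList
  -- filename.lstrip('_'): PySem has no chars-argument lstrip; exact hand port: drop the leading '_' run
  let rest := filename.toList.dropWhile (fun c => c == '_')
  -- rest.split('__')[0]: sep '__' is nonempty so split? = some (splitOn …); split never yields [], so [0] is headD
  let spk_temp := if rest = [] then [] else (PySem.Chars.splitOn rest ['_', '_']).headD []
  String.ofList (pre_ext ++ spk_temp)

-- ===== PORT B =====
def extract_spk_alt (filename : String) : String :=
  let cs := filename.toList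
  -- n = len(filename) - len(filename.lstrip('_'))  (lstrip('_') hand-ported exactly as dropping the leading '_' run)
  let n : Nat := cs.length - (cs.dropWhile (fun c => c == '_')).length
  -- idx = filename.find('__', n)
  let idx : Int := PySem.Chars.findFrom cs ['_', '_'] (n : Int)
  -- filename if idx == -1 else filename[:idx]
  if idx = -1 then filename else String.ofList (PySem.List.slice cs none (some idx))

-- ===== PRECONDITION & SPEC =====
def Spec_extract_spk (filename : String) (out : String) : Prop := out = extract_spk_alt filename
instance (filename : String) (out : String) : Decidable (Spec_extract_spk filename out) := by unfold Spec_extract_spk; infer_instance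

-- ===== CLAIM (what is proved, stated in full; the proofs are below) =====
def Claim_equal_extract_spk : Prop := ∀ (filename : String), Dom_extract_spk filename → Spec_extract_spk filename (extract_spk filename)

-- ===== LEMMAS AND PROOFS =====

-- A's prefix loop is the takeWhile of the leading underscores
lemma extractSpkPre_eq (cs : List Char) :
    extractSpkPre cs = cs.takeWhile (fun c => c == '_') := by
  induction cs with
  | nil => rfl
  | cons c t ih =>
    cases h : (c == '_') with
    | true =>
      have hc : c = '_' := by simpa using h
      simp [extractSpkPre, ih, hc]
    | false => simp [extractSpkPre, h]

-- find.go at offset k in terms of find (= find.go at 0)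
lemma findGo_eq (sub t : List Char) (k : Nat) :
    PySem.Chars.find.go sub t k =
      if PySem.Chars.find t sub = -1 then -1 else PySem.Chars.find t sub + k := by
  induction t generalizing k with
  | nil =>
    by_cases h : sub.isEmpty
    · simp [PySem.Chars.find.go, PySem.Chars.find, h]
    · simp [PySem.Chars.find.go, PySem.Chars.find, h]
  | cons c t ih =>
    by_cases h : sub.isPrefixOf (c :: t)
    · simp [PySem.Chars.find.go, PySem.Chars.find, h]
    · have hb : -1 ≤ PySem.Chars.find t sub := PySem.Chars.neg_one_le_find t sub
      have h1 := ih 1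
      have hk := ih (k + 1)
      have hstep : ∀ m : Nat, PySem.Chars.find.go sub (c :: t) m = PySem.Chars.find.go sub t (m + 1) := by
        intro m; simp [PySem.Chars.find.go, h]
      have hfind : PySem.Chars.find (c :: t) sub = PySem.Chars.find.go sub t 1 := by
        simp [PySem.Chars.find, hstep 0]
      rw [hstep k, hk, hfind, h1]
      split_ifs <;> push_cast <;> omega

-- splitOn.go with a nonempty accumulator: the head of the final (reversed) list is the
-- last accumulated piece, untouched by the rest of the run
lemma splitOnGo_head?_acc (sep : List Char) (fuel : Nat) :
    ∀ (l cur x : List Char) (acc : List (List Char)),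
      (PySem.Chars.splitOn.go sep fuel l cur (x :: acc)).head? = (x :: acc).getLast? := by
  induction fuel with
  | zero =>
    intro l cur x acc
    simp [PySem.Chars.splitOn.go, List.head?_reverse, List.getLast?_cons]
  | succ fuel ih =>
    intro l cur x acc
    cases l with
    | nil => simp [PySem.Chars.splitOn.go, List.head?_reverse, List.getLast?_cons]
    | cons c rest =>
      by_cases hp : sep.isPrefixOf (c :: rest)
      · have : PySem.Chars.splitOn.go sep (fuel + 1) (c :: rest) cur (x :: acc)
            = PySem.Chars.splitOn.go sep fuel (List.drop sep.length (c :: rest)) [] (cur.reverse :: x :: acc) := by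
          simp [PySem.Chars.splitOn.go, hp]
        rw [this, ih]
        simp [List.getLast?_cons_cons]
      · have : PySem.Chars.splitOn.go sep (fuel + 1) (c :: rest) cur (x :: acc)
            = PySem.Chars.splitOn.go sep fuel rest (c :: cur) (x :: acc) := by
          simp [PySem.Chars.splitOn.go, hp]
        rw [this, ih]

-- splitOn.go from an empty accumulator: the first piece is the text up to the first
-- occurrence of sep (the whole remainder if sep does not occur)
lemma splitOnGo_head_nilacc (sep : List Char) (hsep : sep ≠ []) (fuel : Nat) :
    ∀ (l cur : List Char), l.length ≤ fuel →
      (PySem.Chars.splitOn.go sep fuel l cur []).headD [] =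
        cur.reverse ++
          (if PySem.Chars.find l sep = -1 then l else l.take (PySem.Chars.find l sep).toNat) := by
  induction fuel with
  | zero =>
    intro l cur h
    have hl : l = [] := by cases l <;> simp_all
    subst hl
    simp [PySem.Chars.splitOn.go, PySem.Chars.find, PySem.Chars.find.go, hsep]
  | succ fuel ih =>
    intro l cur h
    cases l with
    | nil => simp [PySem.Chars.splitOn.go, PySem.Chars.find, PySem.Chars.find.go, hsep]
    | cons c rest =>
      by_cases hp : sep.isPrefixOf (c :: rest)
      · have hgo : PySem.Chars.splitOn.go sep (fuel + 1) (c :: rest) cur []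
            = PySem.Chars.splitOn.go sep fuel (List.drop sep.length (c :: rest)) [] [cur.reverse] := by
          simp [PySem.Chars.splitOn.go, hp]
        have hfind : PySem.Chars.find (c :: rest) sep = 0 := by
          simp [PySem.Chars.find, PySem.Chars.find.go, hp]
        rw [hgo, hfind]
        have := splitOnGo_head?_acc sep fuel (List.drop sep.length (c :: rest)) [] cur.reverse []
        simp [List.headD_eq_head?_getD, this]
      · have hgo : PySem.Chars.splitOn.go sep (fuel + 1) (c :: rest) cur []
            = PySem.Chars.splitOn.go sep fuel rest (c :: cur) [] := by
          simp [PySem.Chars.splitOn.go, hp]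
        have hlen : rest.length ≤ fuel := by simp at h; omega
        have hb : -1 ≤ PySem.Chars.find rest sep := PySem.Chars.neg_one_le_find rest sep
        have hfind : PySem.Chars.find (c :: rest) sep =
            if PySem.Chars.find rest sep = -1 then -1 else PySem.Chars.find rest sep + 1 := by
          have hstep : PySem.Chars.find.go sep (c :: rest) 0 = PySem.Chars.find.go sep rest 1 := by
            simp [PySem.Chars.find.go, hp]
          have h1 := findGo_eq sep rest 1
          simp [PySem.Chars.find, hstep, h1]
        rw [hgo, ih rest (c :: cur) hlen, hfind]
        by_cases hrest : PySem.Chars.find rest sep = -1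
        · simp [hrest]
        · have h0 : 0 ≤ PySem.Chars.find rest sep := by omega
          have hne : PySem.Chars.find rest sep + 1 ≠ -1 := by omega
          have htn : (PySem.Chars.find rest sep + 1).toNat = (PySem.Chars.find rest sep).toNat + 1 := by
            omega
          simp [hrest, hne, htn, List.take_succ_cons]

-- the first piece of split('__') on a string with nonempty separator
lemma splitOn_head (l sep : List Char) (hsep : sep ≠ []) :
    (PySem.Chars.splitOn l sep).headD [] =
      if PySem.Chars.find l sep = -1 then l else l.take (PySem.Chars.find l sep).toNat := by
  unfold PySem.Chars.splitOn
  simpa using splitOnGo_head_nilacc sep hsep (l.length + 1) l [] (by omega)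

lemma find_nil_ne (sep : List Char) (hsep : sep ≠ []) : PySem.Chars.find [] sep = -1 := by
  simp [PySem.Chars.find, PySem.Chars.find.go, hsep]

-- ===== VERDICT (by name: the statement is the Claim_ definition above) =====
theorem extract_spk_spec : Claim_equal_extract_spk := by
  intro f _
  show extract_spk f = extract_spk_alt f
  unfold extract_spk extract_spk_alt
  show String.ofList (extractSpkPre f.toList ++
        (if (f.toList.dropWhile (fun c => c == '_')) = [] then []
         else (PySem.Chars.splitOn (f.toList.dropWhile (fun c => c == '_')) ['_', '_']).headD [])) =
      (if PySem.Chars.findFrom f.toList ['_', '_']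
            ((f.toList.length - (f.toList.dropWhile (fun c => c == '_')).length : Nat) : Int) = -1
       then f
       else String.ofList (PySem.List.slice f.toList none
              (some (PySem.Chars.findFrom f.toList ['_', '_']
                ((f.toList.length - (f.toList.dropWhile (fun c => c == '_')).length : Nat) : Int)))))
  have hsep : (['_', '_'] : List Char) ≠ [] := by simp
  set cs := f.toList with hcs
  set r := cs.dropWhile (fun c => c == '_') with hr
  set p := cs.takeWhile (fun c => c == '_') with hp
  have hsplit : p ++ r = cs := List.takeWhile_append_dropWhile
  have hlencs : cs.length = p.length + r.length := by
    conv_lhs => rw [← hsplit]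
    simp
  have hn : cs.length - r.length = p.length := by omega
  have hdrop : cs.drop p.length = r := by
    conv_lhs => rw [← hsplit]
    simp
  have hple : p.length ≤ cs.length := by omega
  have hff := PySem.Chars.findFrom_natCast cs ['_', '_'] p.length hple
  rw [extractSpkPre_eq, ← hp, hn]
  -- fold the A-side spk_temp into the find formula
  have hspk : (if r = [] then ([] : List Char) else (PySem.Chars.splitOn r ['_', '_']).headD []) =
      (if PySem.Chars.find r ['_', '_'] = -1 then r else r.take (PySem.Chars.find r ['_', '_']).toNat) := by
    by_cases hr0 : r = []
    · simp [hr0, find_nil_ne _ hsep]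
    · rw [if_neg hr0, splitOn_head r _ hsep]
  rw [hspk]
  rw [hdrop] at hff
  by_cases hfind : PySem.Chars.find r ['_', '_'] = -1
  · rw [hff, if_pos hfind, if_pos hfind, if_pos rfl]
    rw [hsplit, hcs]
    exact String.ofList_toList
  · have hb : -1 ≤ PySem.Chars.find r ['_', '_'] := PySem.Chars.neg_one_le_find r _
    have h0 : 0 ≤ PySem.Chars.find r ['_', '_'] := by omega
    rw [hff, if_neg hfind, if_neg hfind]
    have hne : (p.length : Int) + PySem.Chars.find r ['_', '_'] ≠ -1 := by omega
    rw [if_neg hne]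
    have hslice : PySem.List.slice cs none (some ((p.length : Int) + PySem.Chars.find r ['_', '_']))
        = cs.take ((p.length : Int) + PySem.Chars.find r ['_', '_']).toNat :=
      PySem.List.slice_to cs (by omega)
    rw [hslice]
    have htn : ((p.length : Int) + PySem.Chars.find r ['_', '_']).toNat
        = p.length + (PySem.Chars.find r ['_', '_']).toNat := by omega
    rw [htn]
    conv_rhs => rw [← hsplit]
    have h1 : List.take (p.length + (PySem.Chars.find r ['_', '_']).toNat) p = p :=
      List.take_of_length_le (by omega)
    rw [List.take_append, h1, Nat.add_sub_cancel_left]
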